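-- pv_equiv track=rewrite | github.com/python-testing-sandbox/level_1 | code.py | if_logs_has_any_of_commands
-- ===== SOURCE A (Python) =====
-- def if_logs_has_any_of_commands(log: list[str], commands: list[str]) -> bool:
--     is_section_present = False
--     for required_command in commands:
--         for base_command in log:
--             if (
--                 base_command.startswith(f'{required_command} ')
--                 or f' {required_command} ' in base_command
--                 or base_command == required_command
--             ):
--                 is_section_present = True
--                 break
--     return is_section_present
-- ===== SOURCE B (Python) =====
-- def if_logs_has_any_of_commands(log: list[str], commands: list[str]) -> bool:
--     # Index the commands in a set; per log line, look up the whole line, every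
--     # prefix ending at a space, and every space-bracketed inner substring.
--     command_set = set(commands)
--     for line in log:
--         if line in command_set:
--             return True
--         spaces = [i for i, ch in enumerate(line) if ch == ' ']
--         for i in spaces:
--             if line[:i] in command_set:
--                 return True
--         for i in spaces:
--             for j in spaces:
--                 if i < j and line[i + 1:j] in command_set:
--                     return True
--     return False
-- ===== Notes on version B (the rewrite author's own statement) =====
-- stated objective: faster
-- what changed: Instead of testing every command against every log line with startswith/substring scans, B puts the commands in a hash set and, for each log line, generates the line's only possible matching candidates (the whole line, each prefix ending at a space, each substring bracketed by two spaces) and looks them up in the set.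
import Mathlib
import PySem

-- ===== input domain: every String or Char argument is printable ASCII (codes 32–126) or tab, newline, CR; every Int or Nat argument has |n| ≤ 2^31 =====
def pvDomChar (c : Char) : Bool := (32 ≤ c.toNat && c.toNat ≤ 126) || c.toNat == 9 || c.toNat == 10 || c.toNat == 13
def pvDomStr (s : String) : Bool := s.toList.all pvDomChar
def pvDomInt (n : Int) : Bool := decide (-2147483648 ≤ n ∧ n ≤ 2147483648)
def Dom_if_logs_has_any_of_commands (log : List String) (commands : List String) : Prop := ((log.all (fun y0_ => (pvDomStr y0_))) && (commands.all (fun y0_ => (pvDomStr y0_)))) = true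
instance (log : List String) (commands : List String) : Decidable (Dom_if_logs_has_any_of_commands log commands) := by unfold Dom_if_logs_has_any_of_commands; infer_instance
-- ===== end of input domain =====

-- B indexes the commands in a set and, per log line, looks up the line's candidate
-- substrings (whole line, prefixes ending at a space, space-bracketed inner pieces)
-- instead of testing every command against every line.

-- ===== PORT A =====
-- the three-way test of A's inner if, in A's order
def pvMatchA (required_command base_command : String) : Bool :=
  PySem.Str.startswith base_command (required_command ++ " ")
  || PySem.Str.isIn (" " ++ required_command ++ " ") base_command
  || base_command == required_command

-- inner 'for base_command in log: … is_section_present = True; break' carrying the flag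
def pvInnerA (required_command : String) : List String → Bool → Bool
  | [], flag => flag
  | base_command :: rest, flag =>
    if pvMatchA required_command base_command then true
    else pvInnerA required_command rest flag

def if_logs_has_any_of_commands (log : List String) (commands : List String) : Bool :=
  commands.foldl (fun flag required_command => pvInnerA required_command log flag) false

-- ===== PORT B =====
-- [i for i, ch in enumerate(line) if ch == ' ']
def pvSpaces (cs : List Char) : List Int :=
  ((PySem.List.enumerate cs).filter (fun p => p.2 == ' ')).map (fun p => p.1)

def if_logs_has_any_of_commands_alt (log : List String) (commands : List String) : Bool :=
  let command_set := PySem.Set.ofList commands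
  log.any (fun line =>
    PySem.Set.contains command_set line
    || (let spaces := pvSpaces line.toList
        spaces.any (fun i =>
          PySem.Set.contains command_set
            (String.ofList (PySem.List.slice line.toList none (some i))))
        || spaces.any (fun i => spaces.any (fun j =>
             decide (i < j) && PySem.Set.contains command_set
               (String.ofList (PySem.List.slice line.toList (some (i + 1)) (some j)))))))

-- ===== PRECONDITION & SPEC =====
def Spec_if_logs_has_any_of_commands (log : List String) (commands : List String) (out : Bool) : Prop := out = if_logs_has_any_of_commands_alt log commands
instance (log : List String) (commands : List String) (out : Bool) : Decidable (Spec_if_logs_has_any_of_commands log commands out) := by unfold Spec_if_logs_has_any_of_commands; infer_instance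

-- ===== CLAIM (what is proved, stated in full; the proofs are below) =====
def Claim_equal_if_logs_has_any_of_commands : Prop := ∀ (log : List String) (commands : List String), Dom_if_logs_has_any_of_commands log commands → Spec_if_logs_has_any_of_commands log commands (if_logs_has_any_of_commands log commands)

-- ===== LEMMAS AND PROOFS =====

-- membership in the space-index list
theorem mem_pvSpaces {cs : List Char} {i : Int} :
    i ∈ pvSpaces cs ↔ ∃ (k : Nat) (h : k < cs.length), i = (k : Int) ∧ cs[k] = ' ' := by
  simp [pvSpaces, PySem.List.mem_enumerate_iff]

theorem getElem_append_cons' (a b : List Char) (x : Char) (n : Nat) (hn : n = a.length)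
    (h : n < (a ++ x :: b).length) : (a ++ x :: b)[n] = x := by subst hn; simp

-- A's startswith clause ↔ a prefix candidate of B
theorem startswith_char {cs w : List Char} :
    (w ++ [' ']) <+: cs ↔
      ∃ i ∈ pvSpaces cs, PySem.List.slice cs none (some i) = w := by
  constructor
  · rintro ⟨t, rfl⟩
    refine ⟨(w.length : Int), mem_pvSpaces.2 ⟨w.length, by simp, rfl, by simp⟩, ?_⟩
    rw [PySem.List.slice_to_natCast]
    simp
  · rintro ⟨i, hi, hs⟩
    obtain ⟨k, hk, rfl, hsp⟩ := mem_pvSpaces.1 hi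
    rw [PySem.List.slice_to_natCast] at hs
    have : w ++ [' '] = cs.take (k + 1) := by
      rw [List.take_succ_eq_append_getElem hk, ← hs, hsp]
    rw [this]
    exact List.take_prefix _ _

-- A's "' cmd ' in line" clause ↔ an inner candidate of B
theorem infix_char {cs w : List Char} :
    (' ' :: (w ++ [' '])) <:+: cs ↔
      ∃ i ∈ pvSpaces cs, ∃ j ∈ pvSpaces cs, i < j ∧
        PySem.List.slice cs (some (i + 1)) (some j) = w := by
  constructor
  · rintro ⟨u, v, rfl⟩
    have hcs : u ++ (' ' :: (w ++ [' '])) ++ v = u ++ ' ' :: (w ++ ' ' :: v) := by simp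
    rw [hcs]
    have h2 : u ++ ' ' :: (w ++ ' ' :: v) = (u ++ ' ' :: w) ++ ' ' :: v := by simp
    refine ⟨(u.length : Int),
      mem_pvSpaces.2 ⟨u.length, by simp, rfl, getElem_append_cons' _ _ _ _ rfl _⟩,
      ((u.length + 1 + w.length : Nat) : Int),
      mem_pvSpaces.2 ⟨u.length + 1 + w.length, by simp; omega, by push_cast; ring,
        (List.getElem_of_eq h2 _).trans
          (getElem_append_cons' _ _ _ _ (by simp; omega) _)⟩,
      by push_cast; omega, ?_⟩
    have h1 : (u.length : Int) + 1 = ((u.length + 1 : Nat) : Int) := by push_cast; ring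
    rw [h1, PySem.List.slice_natCast]
    have h3 : u ++ ' ' :: (w ++ ' ' :: v) = (u ++ [' ']) ++ (w ++ ' ' :: v) := by simp
    rw [h3, show u.length + 1 = (u ++ [' ']).length from by simp, List.drop_left]
    simp
  · rintro ⟨i, hi, j, hj, hlt, hs⟩
    obtain ⟨k1, hk1, rfl, hsp1⟩ := mem_pvSpaces.1 hi
    obtain ⟨k2, hk2, rfl, hsp2⟩ := mem_pvSpaces.1 hj
    have hklt : k1 < k2 := by exact_mod_cast hlt
    rw [show ((k1 : Int)) + 1 = ((k1 + 1 : Nat) : Int) from by push_cast; ring,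
      PySem.List.slice_natCast] at hs
    have e1 : cs.drop (k1 + 1) = w ++ cs.drop k2 := by
      conv_lhs => rw [← List.take_append_drop (k2 - (k1 + 1)) (cs.drop (k1 + 1))]
      rw [hs, List.drop_drop, show k1 + 1 + (k2 - (k1 + 1)) = k2 from by omega]
    have e2 : cs.drop k2 = ' ' :: cs.drop (k2 + 1) := by
      rw [List.drop_eq_getElem_cons hk2, hsp2]
    have e3 : cs.drop k1 = ' ' :: cs.drop (k1 + 1) := by
      rw [List.drop_eq_getElem_cons hk1, hsp1]
    have key : cs = cs.take k1 ++ ' ' :: (w ++ ' ' :: cs.drop (k2 + 1)) := by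
      conv_lhs => rw [← List.take_append_drop k1 cs, e3, e1, e2]
    refine ⟨cs.take k1, cs.drop (k2 + 1), ?_⟩
    conv_rhs => rw [key]
    simp

-- the inner loop of A = flag ∨ some line matches
theorem pvInnerA_eq (c : String) (log : List String) (flag : Bool) :
    pvInnerA c log flag = (flag || log.any (pvMatchA c)) := by
  induction log generalizing flag with
  | nil => simp [pvInnerA]
  | cons h t ih =>
    by_cases hm : pvMatchA c h
    · simp [pvInnerA, hm]
    · simp [pvInnerA, hm, ih]

-- A's whole double loop = any/any
theorem A_eq (log commands : List String) :
    if_logs_has_any_of_commands log commands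
      = commands.any (fun c => log.any (pvMatchA c)) := by
  unfold if_logs_has_any_of_commands
  suffices h : ∀ b, commands.foldl (fun flag c => pvInnerA c log flag) b
      = (b || commands.any (fun c => log.any (pvMatchA c))) by simpa using h false
  induction commands with
  | nil => simp
  | cons c t ih => intro b; rw [List.foldl_cons, ih, pvInnerA_eq, List.any_cons, Bool.or_assoc]

theorem ofList_eq_iff {x : List Char} {c : String} : String.ofList x = c ↔ x = c.toList := by
  constructor
  · intro h; rw [← h, String.toList_ofList]
  · intro h; rw [h, String.ofList_toList]

-- A's three-way test on (command, line) ↔ the command is one of B's candidates for the line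
theorem pointwise (c line : String) :
    pvMatchA c line = true ↔
      (line = c
       ∨ (∃ i ∈ pvSpaces line.toList,
            String.ofList (PySem.List.slice line.toList none (some i)) = c)
       ∨ (∃ i ∈ pvSpaces line.toList, ∃ j ∈ pvSpaces line.toList, i < j ∧
            String.ofList (PySem.List.slice line.toList (some (i + 1)) (some j)) = c)) := by
  have h1 : (c ++ " ").toList = c.toList ++ [' '] := by simp
  have h2 : (" " ++ c ++ " ").toList = ' ' :: (c.toList ++ [' ']) := by simp
  rw [pvMatchA]
  simp only [Bool.or_eq_true, PySem.Str.startswith_eq, PySem.Str.isIn_iff_infix,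
    PySem.Chars.startswith_iff, h1, h2, beq_iff_eq]
  rw [startswith_char, infix_char]
  constructor
  · rintro ((⟨i, hi, hs⟩ | ⟨i, hi, j, hj, hlt, hs⟩) | h)
    · exact .inr (.inl ⟨i, hi, ofList_eq_iff.2 hs⟩)
    · exact .inr (.inr ⟨i, hi, j, hj, hlt, ofList_eq_iff.2 hs⟩)
    · exact .inl h
  · rintro (h | ⟨i, hi, hs⟩ | ⟨i, hi, j, hj, hlt, hs⟩)
    · exact .inr h
    · exact .inl (.inl ⟨i, hi, ofList_eq_iff.1 hs⟩)
    · exact .inl (.inr ⟨i, hi, j, hj, hlt, ofList_eq_iff.1 hs⟩)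

-- the any/any form of A equals B (swap the quantifiers, then pointwise)
theorem anyany_eq_alt (log commands : List String) :
    commands.any (fun c => log.any (pvMatchA c)) = if_logs_has_any_of_commands_alt log commands := by
  rw [Bool.eq_iff_iff]
  unfold if_logs_has_any_of_commands_alt
  simp only [List.any_eq_true, Bool.or_eq_true, Bool.and_eq_true, decide_eq_true_eq,
    PySem.Set.contains_iff, PySem.Set.mem_ofList, pointwise]
  constructor
  · rintro ⟨c, hc, line, hl, (h | ⟨i, hi, hs⟩ | ⟨i, hi, j, hj, hlt, hs⟩)⟩
    · exact ⟨line, hl, .inl (by rw [h]; exact hc)⟩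
    · exact ⟨line, hl, .inr (.inl ⟨i, hi, by rw [hs]; exact hc⟩)⟩
    · exact ⟨line, hl, .inr (.inr ⟨i, hi, j, hj, hlt, by rw [hs]; exact hc⟩)⟩
  · rintro ⟨line, hl, (h | ⟨i, hi, hm⟩ | ⟨i, hi, j, hj, hlt, hm⟩)⟩
    · exact ⟨line, h, line, hl, .inl rfl⟩
    · exact ⟨_, hm, line, hl, .inr (.inl ⟨i, hi, rfl⟩)⟩
    · exact ⟨_, hm, line, hl, .inr (.inr ⟨i, hi, j, hj, hlt, rfl⟩)⟩

-- ===== VERDICT (by name: the statement is the Claim_ definition above) =====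
theorem if_logs_has_any_of_commands_spec : Claim_equal_if_logs_has_any_of_commands := by
  intro log commands _
  unfold Spec_if_logs_has_any_of_commands
  rw [A_eq, anyany_eq_alt]
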